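-- pv_equiv track=rewrite | github.com/arytiwari/jioastro | backend/app/services/varshaphal_service.py | _determine_patyayini_dasha_order
-- ===== SOURCE A (Python) =====
-- from typing import Dict, List, Optional, Tuple, Any
--
-- def _determine_patyayini_dasha_order(
--
--     planets: Dict[str, Dict],
--     varsha_lagna: Dict[str, Any]
-- ) -> List[str]:
--     """
--     Determine Patyayini Dasha order based on planetary strengths.
--
--     Simplified version - orders planets by house position strength.
--     """
--     # Calculate house positions
--     lagna_sign = varsha_lagna['sign_num']
--     planet_strengths = []
--
--     for planet_name, planet_data in planets.items():
--         if planet_data and planet_name != 'Ketu':  # Ketu not used in Patyayini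
--             planet_sign = planet_data['sign_num']
--             house = ((planet_sign - lagna_sign) % 12) + 1
--
--             # Calculate simple strength score
--             strength = 0
--             if house in [1, 4, 7, 10]:  # Kendras
--                 strength += 4
--             elif house in [1, 5, 9]:  # Trikonas
--                 strength += 3
--             elif house in [2, 11]:  # Wealth houses
--                 strength += 2
--             else:
--                 strength += 1
--
--             planet_strengths.append((planet_name, strength))
--
--     # Sort by strength (descending)
--     planet_strengths.sort(key=lambda x: x[1], reverse=True)
--
--     return [p[0] for p in planet_strengths]
-- ===== SOURCE B (Python) =====
-- def _determine_patyayini_dasha_order(planets, varsha_lagna):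
--     """Bucket the planets by their 4/3/2/1 strength score in one pass
--     (a counting sort over the fixed key set), instead of sorting pairs."""
--     lagna_sign = varsha_lagna['sign_num']
--     buckets = {4: [], 3: [], 2: [], 1: []}
--     for planet_name, planet_data in planets.items():
--         if planet_data and planet_name != 'Ketu':
--             house = ((planet_data['sign_num'] - lagna_sign) % 12) + 1
--             if house in (1, 4, 7, 10):
--                 s = 4
--             elif house in (1, 5, 9):
--                 s = 3
--             elif house in (2, 11):
--                 s = 2
--             else:
--                 s = 1
--             buckets[s].append(planet_name)
--     return buckets[4] + buckets[3] + buckets[2] + buckets[1]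
-- ===== Notes on version B (the rewrite author's own statement) =====
-- stated objective: alternative
-- what changed: Replaces the collect-pairs-then-stable-sort(reverse) pipeline with a one-pass bucket (counting) sort: planet names are appended to one of four ordered buckets keyed by the fixed 4/3/2/1 strength and the buckets are concatenated high-to-low.
import Mathlib
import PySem

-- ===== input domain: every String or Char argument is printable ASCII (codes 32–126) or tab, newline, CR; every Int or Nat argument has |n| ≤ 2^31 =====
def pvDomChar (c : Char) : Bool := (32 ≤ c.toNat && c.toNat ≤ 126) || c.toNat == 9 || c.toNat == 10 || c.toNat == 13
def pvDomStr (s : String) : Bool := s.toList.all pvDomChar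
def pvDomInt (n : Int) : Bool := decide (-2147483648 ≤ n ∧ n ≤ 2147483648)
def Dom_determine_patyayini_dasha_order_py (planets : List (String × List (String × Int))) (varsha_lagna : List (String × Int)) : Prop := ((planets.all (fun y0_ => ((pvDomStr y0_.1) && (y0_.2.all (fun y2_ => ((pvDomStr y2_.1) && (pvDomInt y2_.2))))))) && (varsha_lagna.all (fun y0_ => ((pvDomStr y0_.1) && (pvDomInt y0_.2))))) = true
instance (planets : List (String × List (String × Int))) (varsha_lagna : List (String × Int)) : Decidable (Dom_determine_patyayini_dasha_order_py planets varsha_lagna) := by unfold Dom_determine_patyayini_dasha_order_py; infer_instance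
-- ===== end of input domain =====

-- B replaces A's collect-pairs-then-stable-reverse-sort with a one-pass bucket (counting)
-- sort over the four fixed strength values; same return value (alternative decomposition).

-- ===== PORT A =====
def determine_patyayini_dasha_order_py (planets : List (String × List (String × Int))) (varsha_lagna : List (String × Int)) : List String :=
  let lagna_sign : Int := (List.lookup "sign_num" varsha_lagna).getD 0
  let planet_strengths : List (String × Int) :=
    planets.foldl (fun acc x =>
      if !x.2.isEmpty && x.1 != "Ketu" then
        let planet_sign : Int := (List.lookup "sign_num" x.2).getD 0
        let house : Int := PySem.Int.mod (planet_sign - lagna_sign) 12 + 1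
        let strength : Int :=
          if house = 1 ∨ house = 4 ∨ house = 7 ∨ house = 10 then 4
          else if house = 1 ∨ house = 5 ∨ house = 9 then 3
          else if house = 2 ∨ house = 11 then 2
          else 1
        acc ++ [(x.1, strength)]
      else acc) []
  (PySem.List.sorted planet_strengths (fun p => p.2) true).map (fun p => p.1)

-- ===== PORT B =====
def determine_patyayini_dasha_order_py_alt (planets : List (String × List (String × Int))) (varsha_lagna : List (String × Int)) : List String :=
  let lagna_sign : Int := (List.lookup "sign_num" varsha_lagna).getD 0
  let buckets : List String × List String × List String × List String :=
    planets.foldl (fun b x =>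
      if !x.2.isEmpty && x.1 != "Ketu" then
        let house : Int := PySem.Int.mod ((List.lookup "sign_num" x.2).getD 0 - lagna_sign) 12 + 1
        if house = 1 ∨ house = 4 ∨ house = 7 ∨ house = 10 then (b.1 ++ [x.1], b.2.1, b.2.2.1, b.2.2.2)
        else if house = 1 ∨ house = 5 ∨ house = 9 then (b.1, b.2.1 ++ [x.1], b.2.2.1, b.2.2.2)
        else if house = 2 ∨ house = 11 then (b.1, b.2.1, b.2.2.1 ++ [x.1], b.2.2.2)
        else (b.1, b.2.1, b.2.2.1, b.2.2.2 ++ [x.1])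
      else b) ([], [], [], [])
  buckets.1 ++ buckets.2.1 ++ buckets.2.2.1 ++ buckets.2.2.2

-- ===== PRECONDITION & SPEC =====
-- Pre_ excludes exactly the inputs on which Python A raises KeyError: a missing
-- 'sign_num' in varsha_lagna, or in the data of a processed (truthy, non-Ketu) planet.
def Pre_determine_patyayini_dasha_order_py (planets : List (String × List (String × Int))) (varsha_lagna : List (String × Int)) : Prop :=
  (List.lookup "sign_num" varsha_lagna).isSome = true ∧
  ∀ x ∈ planets, x.2 ≠ [] → x.1 ≠ "Ketu" → (List.lookup "sign_num" x.2).isSome = true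
instance (planets : List (String × List (String × Int))) (varsha_lagna : List (String × Int)) : Decidable (Pre_determine_patyayini_dasha_order_py planets varsha_lagna) := by unfold Pre_determine_patyayini_dasha_order_py; infer_instance

def pvWitness_determine_patyayini_dasha_order_py : (List (String × List (String × Int))) × (List (String × Int)) :=
  ([("Sun", [("sign_num", 5)]), ("Moon", [("sign_num", 2)])], [("sign_num", 1)])

def Spec_determine_patyayini_dasha_order_py (planets : List (String × List (String × Int))) (varsha_lagna : List (String × Int)) (out : List String) : Prop := out = determine_patyayini_dasha_order_py_alt planets varsha_lagna
instance (planets : List (String × List (String × Int))) (varsha_lagna : List (String × Int)) (out : List String) : Decidable (Spec_determine_patyayini_dasha_order_py planets varsha_lagna out) := by unfold Spec_determine_patyayini_dasha_order_py; infer_instance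

-- ===== CLAIM (what is proved, stated in full; the proofs are below) =====
def Claim_equal_determine_patyayini_dasha_order_py : Prop := ∀ (planets : List (String × List (String × Int))) (varsha_lagna : List (String × Int)), Dom_determine_patyayini_dasha_order_py planets varsha_lagna → Pre_determine_patyayini_dasha_order_py planets varsha_lagna → Spec_determine_patyayini_dasha_order_py planets varsha_lagna (determine_patyayini_dasha_order_py planets varsha_lagna)

-- ===== LEMMAS AND PROOFS =====

-- per-planet condition and (name, strength) pair, as A computes them
def pvCond (x : String × List (String × Int)) : Bool := !x.2.isEmpty && x.1 != "Ketu"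

def pvStrength (lagna_sign sign : Int) : Int :=
  let house : Int := PySem.Int.mod (sign - lagna_sign) 12 + 1
  if house = 1 ∨ house = 4 ∨ house = 7 ∨ house = 10 then 4
  else if house = 1 ∨ house = 5 ∨ house = 9 then 3
  else if house = 2 ∨ house = 11 then 2
  else 1

def pvPair (lagna_sign : Int) (x : String × List (String × Int)) : String × Int :=
  (x.1, pvStrength lagna_sign ((List.lookup "sign_num" x.2).getD 0))

def pvL (lagna_sign : Int) (planets : List (String × List (String × Int))) : List (String × Int) :=
  (planets.filter pvCond).map (pvPair lagna_sign)

lemma pvStrength_mem (l s : Int) : pvStrength l s = 4 ∨ pvStrength l s = 3 ∨ pvStrength l s = 2 ∨ pvStrength l s = 1 := by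
  simp only [pvStrength]
  split_ifs <;> simp

-- insert into the middle: x goes right after the block it does not precede
lemma insertBy_mid {α : Type} (before : α → α → Bool) (x : α) (as bs : List α)
    (ha : ∀ a ∈ as, before x a = false)
    (hb : ∀ b, bs.head? = some b → before x b = true) :
    PySem.List.insertBy before x (as ++ bs) = as ++ x :: bs := by
  induction as with
  | nil =>
    cases bs with
    | nil => simp [PySem.List.insertBy]
    | cons b t => simp [PySem.List.insertBy, hb b rfl]
  | cons a as' ih =>
    have h1 : before x a = false := ha a (by simp)
    simp only [List.cons_append, PySem.List.insertBy, h1]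
    simp only [Bool.false_eq_true, if_false]
    rw [ih (fun a' h' => ha a' (by simp [h']))]

lemma snd_of_mem_filter {L : List (String × Int)} {v : Int} {q : String × Int}
    (h : q ∈ L.filter (fun p => p.2 == v)) : q.2 = v := by
  have := (List.mem_filter.mp h).2
  simpa using this

-- the stable reverse sort of a list whose keys lie in {4,3,2,1} is the concatenation of its buckets
lemma sorted_buckets (L : List (String × Int))
    (h : ∀ q ∈ L, q.2 = 4 ∨ q.2 = 3 ∨ q.2 = 2 ∨ q.2 = 1) :
    PySem.List.sorted L (fun p => p.2) true =
      L.filter (fun p => p.2 == 4) ++ L.filter (fun p => p.2 == 3) ++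
      L.filter (fun p => p.2 == 2) ++ L.filter (fun p => p.2 == 1) := by
  rw [PySem.List.sorted_rev_eq_foldl_insertBy]
  induction L using List.reverseRecOn with
  | nil => simp
  | append_singleton L x ih =>
    have hL : ∀ q ∈ L, q.2 = 4 ∨ q.2 = 3 ∨ q.2 = 2 ∨ q.2 = 1 := fun q hq => h q (by simp [hq])
    have hx := h x (by simp)
    rw [List.foldl_append, List.foldl_cons, List.foldl_nil, ih hL]
    simp only [List.filter_append]
    set before : (String × Int) → (String × Int) → Bool := fun a b => decide (b.2 < a.2) with hbef
    rcases hx with hx | hx | hx | hx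
    · rw [show L.filter (fun p => p.2 == 4) ++ L.filter (fun p => p.2 == 3) ++ L.filter (fun p => p.2 == 2) ++ L.filter (fun p => p.2 == 1)
            = L.filter (fun p => p.2 == 4) ++ (L.filter (fun p => p.2 == 3) ++ L.filter (fun p => p.2 == 2) ++ L.filter (fun p => p.2 == 1)) by simp [List.append_assoc]]
      rw [insertBy_mid before x _ _
          (by intro a haa; have := snd_of_mem_filter haa; simp [hbef, this, hx])
          (by intro b hbh
              have hbm : b ∈ L.filter (fun p => p.2 == 3) ++ L.filter (fun p => p.2 == 2) ++ L.filter (fun p => p.2 == 1) := List.mem_of_mem_head? hbh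
              simp only [List.mem_append] at hbm
              have : b.2 = 3 ∨ b.2 = 2 ∨ b.2 = 1 := by
                rcases hbm with (hb1 | hb2) | hb3
                · exact Or.inl (snd_of_mem_filter hb1)
                · exact Or.inr (Or.inl (snd_of_mem_filter hb2))
                · exact Or.inr (Or.inr (snd_of_mem_filter hb3))
              simp only [hbef, hx, decide_eq_true_eq]
              omega)]
      simp [hx, List.append_assoc]
    · rw [show L.filter (fun p => p.2 == 4) ++ L.filter (fun p => p.2 == 3) ++ L.filter (fun p => p.2 == 2) ++ L.filter (fun p => p.2 == 1)
            = (L.filter (fun p => p.2 == 4) ++ L.filter (fun p => p.2 == 3)) ++ (L.filter (fun p => p.2 == 2) ++ L.filter (fun p => p.2 == 1)) by simp [List.append_assoc]]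
      rw [insertBy_mid before x _ _
          (by intro a haa
              simp only [List.mem_append] at haa
              have : a.2 = 4 ∨ a.2 = 3 := by
                rcases haa with hb1 | hb2
                · exact Or.inl (snd_of_mem_filter hb1)
                · exact Or.inr (snd_of_mem_filter hb2)
              simp only [hbef, hx, decide_eq_false_iff_not]
              omega)
          (by intro b hbh
              have hbm : b ∈ L.filter (fun p => p.2 == 2) ++ L.filter (fun p => p.2 == 1) := List.mem_of_mem_head? hbh
              simp only [List.mem_append] at hbm
              have : b.2 = 2 ∨ b.2 = 1 := by
                rcases hbm with hb1 | hb2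
                · exact Or.inl (snd_of_mem_filter hb1)
                · exact Or.inr (snd_of_mem_filter hb2)
              simp only [hbef, hx, decide_eq_true_eq]
              omega)]
      simp [hx, List.append_assoc]
    · rw [show L.filter (fun p => p.2 == 4) ++ L.filter (fun p => p.2 == 3) ++ L.filter (fun p => p.2 == 2) ++ L.filter (fun p => p.2 == 1)
            = (L.filter (fun p => p.2 == 4) ++ L.filter (fun p => p.2 == 3) ++ L.filter (fun p => p.2 == 2)) ++ L.filter (fun p => p.2 == 1) by simp [List.append_assoc]]
      rw [insertBy_mid before x _ _
          (by intro a haa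
              simp only [List.mem_append] at haa
              have : a.2 = 4 ∨ a.2 = 3 ∨ a.2 = 2 := by
                rcases haa with (hb1 | hb2) | hb3
                · exact Or.inl (snd_of_mem_filter hb1)
                · exact Or.inr (Or.inl (snd_of_mem_filter hb2))
                · exact Or.inr (Or.inr (snd_of_mem_filter hb3))
              simp only [hbef, hx, decide_eq_false_iff_not]
              omega)
          (by intro b hbh
              have hbm : b ∈ L.filter (fun p => p.2 == 1) := List.mem_of_mem_head? hbh
              have : b.2 = 1 := snd_of_mem_filter hbm
              simp only [hbef, hx, decide_eq_true_eq]
              omega)]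
      simp [hx, List.append_assoc]
    · rw [show L.filter (fun p => p.2 == 4) ++ L.filter (fun p => p.2 == 3) ++ L.filter (fun p => p.2 == 2) ++ L.filter (fun p => p.2 == 1)
            = (L.filter (fun p => p.2 == 4) ++ L.filter (fun p => p.2 == 3) ++ L.filter (fun p => p.2 == 2) ++ L.filter (fun p => p.2 == 1)) ++ [] by simp]
      rw [insertBy_mid before x _ []
          (by intro a haa
              simp only [List.mem_append] at haa
              have : a.2 = 4 ∨ a.2 = 3 ∨ a.2 = 2 ∨ a.2 = 1 := by
                rcases haa with ((hb1 | hb2) | hb3) | hb4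
                · exact Or.inl (snd_of_mem_filter hb1)
                · exact Or.inr (Or.inl (snd_of_mem_filter hb2))
                · exact Or.inr (Or.inr (Or.inl (snd_of_mem_filter hb3)))
                · exact Or.inr (Or.inr (Or.inr (snd_of_mem_filter hb4)))
              simp only [hbef, hx, decide_eq_false_iff_not]
              omega)
          (by intro b hbh; simp at hbh)]
      simp [hx, List.append_assoc]

-- A's loop collects exactly pvL (the foldl body of the port is definitionally the pvCond/pvPair step)
lemma A_eq (planets : List (String × List (String × Int))) (varsha_lagna : List (String × Int)) :
    determine_patyayini_dasha_order_py planets varsha_lagna =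
      (PySem.List.sorted (pvL ((List.lookup "sign_num" varsha_lagna).getD 0) planets) (fun p => p.2) true).map (fun p => p.1) := by
  have h : planets.foldl (fun acc x => if pvCond x = true then acc ++ [pvPair ((List.lookup "sign_num" varsha_lagna).getD 0) x] else acc) []
      = pvL ((List.lookup "sign_num" varsha_lagna).getD 0) planets := by
    rw [PySem.List.foldl_append_if]
    rfl
  exact congrArg (fun l => (PySem.List.sorted l (fun p : String × Int => p.2) true).map (fun p => p.1)) h

-- B's loop builds exactly the four buckets of pvL
lemma B_fold (lagna : Int) (planets : List (String × List (String × Int)))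
    (a4 a3 a2 a1 : List String) :
    planets.foldl (fun b x =>
      if pvCond x = true then
        if PySem.Int.mod ((List.lookup "sign_num" x.2).getD 0 - lagna) 12 + 1 = 1 ∨ PySem.Int.mod ((List.lookup "sign_num" x.2).getD 0 - lagna) 12 + 1 = 4 ∨ PySem.Int.mod ((List.lookup "sign_num" x.2).getD 0 - lagna) 12 + 1 = 7 ∨ PySem.Int.mod ((List.lookup "sign_num" x.2).getD 0 - lagna) 12 + 1 = 10 then (b.1 ++ [x.1], b.2.1, b.2.2.1, b.2.2.2)
        else if PySem.Int.mod ((List.lookup "sign_num" x.2).getD 0 - lagna) 12 + 1 = 1 ∨ PySem.Int.mod ((List.lookup "sign_num" x.2).getD 0 - lagna) 12 + 1 = 5 ∨ PySem.Int.mod ((List.lookup "sign_num" x.2).getD 0 - lagna) 12 + 1 = 9 then (b.1, b.2.1 ++ [x.1], b.2.2.1, b.2.2.2)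
        else if PySem.Int.mod ((List.lookup "sign_num" x.2).getD 0 - lagna) 12 + 1 = 2 ∨ PySem.Int.mod ((List.lookup "sign_num" x.2).getD 0 - lagna) 12 + 1 = 11 then (b.1, b.2.1, b.2.2.1 ++ [x.1], b.2.2.2)
        else (b.1, b.2.1, b.2.2.1, b.2.2.2 ++ [x.1])
      else b) (a4, a3, a2, a1) =
    (a4 ++ ((pvL lagna planets).filter (fun p => p.2 == 4)).map (fun p => p.1),
     a3 ++ ((pvL lagna planets).filter (fun p => p.2 == 3)).map (fun p => p.1),
     a2 ++ ((pvL lagna planets).filter (fun p => p.2 == 2)).map (fun p => p.1),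
     a1 ++ ((pvL lagna planets).filter (fun p => p.2 == 1)).map (fun p => p.1)) := by
  induction planets generalizing a4 a3 a2 a1 with
  | nil => simp [pvL]
  | cons x ps ih =>
    rw [List.foldl_cons]
    by_cases hc : pvCond x = true
    · have hL : pvL lagna (x :: ps) = pvPair lagna x :: pvL lagna ps := by
        simp [pvL, hc]
      rw [hL]
      simp only [hc, if_true]
      by_cases h1 : PySem.Int.mod ((List.lookup "sign_num" x.2).getD 0 - lagna) 12 + 1 = 1 ∨ PySem.Int.mod ((List.lookup "sign_num" x.2).getD 0 - lagna) 12 + 1 = 4 ∨ PySem.Int.mod ((List.lookup "sign_num" x.2).getD 0 - lagna) 12 + 1 = 7 ∨ PySem.Int.mod ((List.lookup "sign_num" x.2).getD 0 - lagna) 12 + 1 = 10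
      · have hs : pvStrength lagna ((List.lookup "sign_num" x.2).getD 0) = 4 := by
          simp only [pvStrength]; rw [if_pos h1]
        simp only [if_pos h1]
        rw [ih]
        simp [pvPair, hs, List.append_assoc]
      · by_cases h2 : PySem.Int.mod ((List.lookup "sign_num" x.2).getD 0 - lagna) 12 + 1 = 1 ∨ PySem.Int.mod ((List.lookup "sign_num" x.2).getD 0 - lagna) 12 + 1 = 5 ∨ PySem.Int.mod ((List.lookup "sign_num" x.2).getD 0 - lagna) 12 + 1 = 9
        · have hs : pvStrength lagna ((List.lookup "sign_num" x.2).getD 0) = 3 := by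
            simp only [pvStrength]; rw [if_neg h1, if_pos h2]
          simp only [if_neg h1, if_pos h2]
          rw [ih]
          simp [pvPair, hs, List.append_assoc]
        · by_cases h3 : PySem.Int.mod ((List.lookup "sign_num" x.2).getD 0 - lagna) 12 + 1 = 2 ∨ PySem.Int.mod ((List.lookup "sign_num" x.2).getD 0 - lagna) 12 + 1 = 11
          · have hs : pvStrength lagna ((List.lookup "sign_num" x.2).getD 0) = 2 := by
              simp only [pvStrength]; rw [if_neg h1, if_neg h2, if_pos h3]
            simp only [if_neg h1, if_neg h2, if_pos h3]
            rw [ih]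
            simp [pvPair, hs, List.append_assoc]
          · have hs : pvStrength lagna ((List.lookup "sign_num" x.2).getD 0) = 1 := by
              simp only [pvStrength]; rw [if_neg h1, if_neg h2, if_neg h3]
            simp only [if_neg h1, if_neg h2, if_neg h3]
            rw [ih]
            simp [pvPair, hs, List.append_assoc]
    · have hL : pvL lagna (x :: ps) = pvL lagna ps := by
        simp [pvL, hc]
      rw [hL]
      simp only [hc]
      exact ih a4 a3 a2 a1

-- ===== VERDICT (by name: the statement is the Claim_ definition above) =====
theorem determine_patyayini_dasha_order_py_spec : Claim_equal_determine_patyayini_dasha_order_py := by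
  intro planets varsha_lagna _ _
  unfold Spec_determine_patyayini_dasha_order_py
  have hkeys : ∀ q ∈ pvL ((List.lookup "sign_num" varsha_lagna).getD 0) planets, q.2 = 4 ∨ q.2 = 3 ∨ q.2 = 2 ∨ q.2 = 1 := by
    intro q hq
    simp only [pvL, List.mem_map] at hq
    obtain ⟨y, _, hy⟩ := hq
    rw [← hy]
    exact pvStrength_mem _ _
  have hB : determine_patyayini_dasha_order_py_alt planets varsha_lagna =
      ([] ++ ((pvL ((List.lookup "sign_num" varsha_lagna).getD 0) planets).filter (fun p => p.2 == 4)).map (fun p => p.1)) ++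
      ([] ++ ((pvL ((List.lookup "sign_num" varsha_lagna).getD 0) planets).filter (fun p => p.2 == 3)).map (fun p => p.1)) ++
      ([] ++ ((pvL ((List.lookup "sign_num" varsha_lagna).getD 0) planets).filter (fun p => p.2 == 2)).map (fun p => p.1)) ++
      ([] ++ ((pvL ((List.lookup "sign_num" varsha_lagna).getD 0) planets).filter (fun p => p.2 == 1)).map (fun p => p.1)) :=
    congrArg (fun b : List String × List String × List String × List String => b.1 ++ b.2.1 ++ b.2.2.1 ++ b.2.2.2)
      (B_fold ((List.lookup "sign_num" varsha_lagna).getD 0) planets [] [] [] [])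
  rw [A_eq, hB, sorted_buckets _ hkeys]
  simp [List.map_append, List.append_assoc]
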